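-- pv_equiv track=rewrite | github.com/UtarshM/aiblogfinal | server/seo_content_writer.py | _insert_images_after_headings
-- ===== SOURCE A (Python) =====
-- from typing import Dict, List
--
-- def _insert_images_after_headings(content: str, images: List[Dict]) -> str:
--     """Insert images strategically after H2 headings"""
--
--     if not images:
--         return content
--
--     lines = content.split('\n')
--     result = []
--     image_index = 0
--
--     for i, line in enumerate(lines):
--         result.append(line)
--
--         # Insert image after H2 headings (but not after H1)
--         if line.startswith('## ') and image_index < len(images):
--             # Add blank line, image, blank line
--             result.append('')
--             img = images[image_index]
--             result.append(f"![{img['alt']}]({img['url']})")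
--             result.append('')
--             image_index += 1
--
--     # If we still have images left, add them at the end of sections
--     while image_index < len(images):
--         # Find a good spot (after a paragraph)
--         for i in range(len(result) - 1, 0, -1):
--             if result[i].strip() and not result[i].startswith('#') and not result[i].startswith('!['):
--                 result.insert(i + 1, '')
--                 img = images[image_index]
--                 result.insert(i + 2, f"![{img['alt']}]({img['url']})")
--                 result.insert(i + 3, '')
--                 image_index += 1
--                 break
--         else:
--             break
--
--     return '\n'.join(result)
-- ===== SOURCE B (Python) =====
-- from typing import Dict, List
--
-- def _fmt(img: Dict) -> str:
--     return f"![{img['alt']}]({img['url']})"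
--
-- def _insert_images_after_headings(content: str, images: List[Dict]) -> str:
--     """Insert images strategically after H2 headings"""
--     if not images:
--         return content
--
--     # One pass: attach the next unused image (blank-line wrapped) to each H2 heading.
--     it = iter(images)
--     result = []
--     for line in content.split('\n'):
--         result.append(line)
--         if line.startswith('## '):
--             img = next(it, None)
--             if img is not None:
--                 result.extend(['', _fmt(img), ''])
--     leftover = list(it)
--
--     if leftover:
--         # Find the single insertion point once: the last paragraph line (index >= 1),
--         # then splice all leftover images there in one go, in reverse order.
--         anchor = next((i for i in range(len(result) - 1, 0, -1)
--                        if result[i].strip()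
--                        and not result[i].startswith('#')
--                        and not result[i].startswith('![')), None)
--         if anchor is not None:
--             block = []
--             for img in reversed(leftover):
--                 block.extend(['', _fmt(img), ''])
--             result[anchor + 1:anchor + 1] = block
--
--     return '\n'.join(result)
-- ===== Notes on version B (the rewrite author's own statement) =====
-- stated objective: alternative
-- what changed: The leftover-image phase no longer re-scans the result list and performs three list.insert shifts per leftover image: B finds the single anchor index once (last paragraph line) and splices all leftover images, reversed, there in one slice assignment; the heading pass consumes images from an iterator in a single pass.
import Mathlib
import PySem

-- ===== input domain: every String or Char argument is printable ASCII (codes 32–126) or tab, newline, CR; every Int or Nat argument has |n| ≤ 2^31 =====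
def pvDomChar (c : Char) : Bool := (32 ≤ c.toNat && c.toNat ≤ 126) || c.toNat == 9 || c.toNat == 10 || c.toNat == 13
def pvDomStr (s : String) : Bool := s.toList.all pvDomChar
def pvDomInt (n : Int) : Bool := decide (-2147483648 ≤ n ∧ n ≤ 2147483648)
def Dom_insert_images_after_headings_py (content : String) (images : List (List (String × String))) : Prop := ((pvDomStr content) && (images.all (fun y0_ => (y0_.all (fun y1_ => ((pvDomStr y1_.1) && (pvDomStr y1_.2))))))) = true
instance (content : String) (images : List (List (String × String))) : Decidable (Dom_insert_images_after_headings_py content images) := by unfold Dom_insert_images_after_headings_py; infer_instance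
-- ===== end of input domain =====

-- B restructures A: instead of re-scanning the result and doing three list.insert shifts per
-- leftover image, B finds the single anchor index once and splices all leftover images (reversed)
-- there in one slice assignment; the heading pass consumes images from an iterator in one pass.

-- shared helpers: both Pythons format images and test lines with the same expressions
def pvGetS (img : List (String × String)) (k : String) : String :=
  ((PySem.Dict.mk img).get? k).getD ""

def pvFmt (img : List (String × String)) : String :=
  "![" ++ pvGetS img "alt" ++ "](" ++ pvGetS img "url" ++ ")"

def pvQual (s : String) : Bool :=
  (PySem.Str.strip s != "") && !(PySem.Str.startswith s "#") && !(PySem.Str.startswith s "![")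

def pvLines (content : String) : List String :=
  (PySem.Str.split? content "\n").getD []    -- sep "\n" ≠ "": split? is always some here

-- the downward scan 'for i in range(len(result)-1, 0, -1): if result[i] qualifies' (both Pythons run it)
def pvScanDown (res : List String) : Nat → Option Nat
  | 0 => none
  | i + 1 => if pvQual (res.getD (i + 1) "") then some (i + 1) else pvScanDown res i

-- ===== PORT A =====
def pvStepA (images : List (List (String × String))) (st : List String × Nat) (line : String) :
    List String × Nat :=
  let res := st.1 ++ [line]
  if PySem.Str.startswith line "## " && decide (st.2 < images.length) then
    (res ++ ["", pvFmt (images.getD st.2 []), ""], st.2 + 1)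
  else (res, st.2)

-- A's while loop: re-scan result each iteration, insert at i+1, i+2, i+3 (or break on no anchor)
def pvLoopA : List String → List (List (String × String)) → List String
  | result, [] => result
  | result, img :: rest =>
    match pvScanDown result (result.length - 1) with
    | some i =>
        pvLoopA
          (PySem.List.insert
            (PySem.List.insert
              (PySem.List.insert result ((i + 1 : Nat) : Int) "")
              ((i + 2 : Nat) : Int) (pvFmt img))
            ((i + 3 : Nat) : Int) "") rest
    | none => result

def insert_images_after_headings_py (content : String) (images : List (List (String × String))) : String :=
  if images.isEmpty then content
  else
    let lines := pvLines content
    let p := lines.foldl (pvStepA images) ([], 0)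
    PySem.Str.join "\n" (pvLoopA p.1 (images.drop p.2))

-- ===== PORT B =====
def pvBlock (img : List (String × String)) : List String := ["", pvFmt img, ""]

-- B's single pass: consume images from the front at each '## ' line; returns (result, leftover)
def pvPass1 : List String → List (List (String × String)) → List String × List (List (String × String))
  | [], imgs => ([], imgs)
  | l :: ls, imgs =>
    if PySem.Str.startswith l "## " then
      match imgs with
      | img :: rest =>
        let p := pvPass1 ls rest
        (l :: "" :: pvFmt img :: "" :: p.1, p.2)
      | [] =>
        let p := pvPass1 ls []
        (l :: p.1, p.2)
    else
      let p := pvPass1 ls imgs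
      (l :: p.1, p.2)

def insert_images_after_headings_py_alt (content : String) (images : List (List (String × String))) : String :=
  if images.isEmpty then content
  else
    let p := pvPass1 (pvLines content) images
    let result :=
      if p.2.isEmpty then p.1
      else
        match pvScanDown p.1 (p.1.length - 1) with
        | none => p.1
        | some a => p.1.take (a + 1) ++ p.2.reverse.flatMap pvBlock ++ p.1.drop (a + 1)
    PySem.Str.join "\n" result

-- ===== PRECONDITION & SPEC =====
-- Pre_ excludes exactly the inputs where Python A raises KeyError: an image dict that A actually
-- reads (one attached to a '## ' heading, or any image at all when a paragraph anchor line exists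
-- at index ≥ 1) must carry both the 'alt' and the 'url' key.
def Pre_insert_images_after_headings_py (content : String) (images : List (List (String × String))) : Prop :=
  let lines := pvLines content
  let h := (lines.filter (fun l => PySem.Str.startswith l "## ")).length
  let ok := fun (img : List (String × String)) =>
    ((PySem.Dict.mk img).get? "alt").isSome = true ∧ ((PySem.Dict.mk img).get? "url").isSome = true
  (∀ img ∈ images.take h, ok img) ∧ (((lines.drop 1).any pvQual) = true → ∀ img ∈ images, ok img)
instance (content : String) (images : List (List (String × String))) : Decidable (Pre_insert_images_after_headings_py content images) := by unfold Pre_insert_images_after_headings_py; infer_instance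

def pvWitness_insert_images_after_headings_py : String × (List (List (String × String))) :=
  ("## Title\nSome paragraph text.", [[("alt", "a pic"), ("url", "http://x/y.png")]])

def Spec_insert_images_after_headings_py (content : String) (images : List (List (String × String))) (out : String) : Prop := out = insert_images_after_headings_py_alt content images
instance (content : String) (images : List (List (String × String))) (out : String) : Decidable (Spec_insert_images_after_headings_py content images out) := by unfold Spec_insert_images_after_headings_py; infer_instance

-- ===== CLAIM (what is proved, stated in full; the proofs are below) =====
def Claim_equal_insert_images_after_headings_py : Prop := ∀ (content : String) (images : List (List (String × String))), Dom_insert_images_after_headings_py content images → Pre_insert_images_after_headings_py content images → Spec_insert_images_after_headings_py content images (insert_images_after_headings_py content images)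

-- ===== LEMMAS AND PROOFS =====

lemma pass1_foldA (images : List (List (String × String))) :
    ∀ (lines : List String) (acc : List String) (j : Nat) (rem : List (List (String × String))),
      images.drop j = rem →
      ∃ c : Nat, (pvPass1 lines rem).2 = rem.drop c ∧
        lines.foldl (pvStepA images) (acc, j) = (acc ++ (pvPass1 lines rem).1, j + c) := by
  intro lines
  induction lines with
  | nil =>
    intro acc j rem _
    exact ⟨0, by simp [pvPass1], by simp [pvPass1]⟩
  | cons l ls ih =>
    intro acc j rem hrem
    by_cases hs : PySem.Str.startswith l "## " = true
    · have hs' : PySem.Chars.startswith l.toList ['#', '#', ' '] = true := by simpa using hs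
      cases rem with
      | nil =>
        have hjlen : images.length ≤ j := List.drop_eq_nil_iff.mp hrem
        have hstep : pvStepA images (acc, j) l = (acc ++ [l], j) := by
          simp [pvStepA, hs']; omega
        have hp : pvPass1 (l :: ls) [] = ((l :: (pvPass1 ls []).1 : List String), (pvPass1 ls []).2) := by
          simp [pvPass1, hs']
        obtain ⟨c, hc1, hc2⟩ := ih (acc ++ [l]) j [] hrem
        refine ⟨c, by rw [hp]; exact hc1, ?_⟩
        rw [List.foldl_cons, hstep, hc2, hp]
        simp
      | cons img rest =>
        have hget : images[j]? = some img := by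
          have := @List.getElem?_drop _ images j 0
          rw [hrem] at this
          simpa using this.symm
        obtain ⟨hjlt, hE⟩ := List.getElem?_eq_some_iff.mp hget
        have hdrop : images.drop (j + 1) = rest := by
          have h1 : images.drop (j + 1) = (images.drop j).drop 1 := by
            rw [List.drop_drop]
          rw [h1, hrem]; rfl
        have hstep : pvStepA images (acc, j) l
            = (acc ++ [l] ++ ["", pvFmt img, ""], j + 1) := by
          simp [pvStepA, hs', hjlt, hE]
        have hp : pvPass1 (l :: ls) (img :: rest)
            = ((l :: "" :: pvFmt img :: "" :: (pvPass1 ls rest).1 : List String), (pvPass1 ls rest).2) := by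
          simp [pvPass1, hs']
        obtain ⟨c, hc1, hc2⟩ := ih (acc ++ [l] ++ ["", pvFmt img, ""]) (j + 1) rest hdrop
        refine ⟨c + 1, ?_, ?_⟩
        · rw [hp]
          rw [hc1]; rfl
        · rw [List.foldl_cons, hstep, hc2, hp]
          simp only [Prod.mk.injEq]
          exact ⟨by simp, by omega⟩
    · have hs' : PySem.Chars.startswith l.toList ['#', '#', ' '] = false := by simpa using hs
      have hstep : pvStepA images (acc, j) l = (acc ++ [l], j) := by
        simp [pvStepA, hs']
      have hp : pvPass1 (l :: ls) rem = ((l :: (pvPass1 ls rem).1 : List String), (pvPass1 ls rem).2) := by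
        simp [pvPass1, hs']
      obtain ⟨c, hc1, hc2⟩ := ih (acc ++ [l]) j rem hrem
      refine ⟨c, by rw [hp]; exact hc1, ?_⟩
      rw [List.foldl_cons, hstep, hc2, hp]
      simp

lemma scanDown_some (res : List String) :
    ∀ i a, pvScanDown res i = some a →
      1 ≤ a ∧ a ≤ i ∧ pvQual (res.getD a "") = true ∧
      ∀ j, a < j → j ≤ i → pvQual (res.getD j "") = false := by
  intro i
  induction i with
  | zero => intro a h; simp [pvScanDown] at h
  | succ i ih =>
    intro a h
    unfold pvScanDown at h
    by_cases hq : pvQual (res.getD (i + 1) "") = true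
    · rw [if_pos hq] at h
      obtain rfl : i + 1 = a := by injection h
      exact ⟨by omega, by omega, hq, fun j hj1 hj2 => by omega⟩
    · rw [if_neg hq] at h
      obtain ⟨h1, h2, h3, h4⟩ := ih a h
      refine ⟨h1, by omega, h3, fun j hj1 hj2 => ?_⟩
      by_cases hji : j ≤ i
      · exact h4 j hj1 hji
      · have : j = i + 1 := by omega
        subst this
        simpa using hq


lemma scanDown_eq_some (res : List String) :
    ∀ i a, 1 ≤ a → a ≤ i → pvQual (res.getD a "") = true →
      (∀ j, a < j → j ≤ i → pvQual (res.getD j "") = false) →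
      pvScanDown res i = some a := by
  intro i
  induction i with
  | zero => intro a h1 h2 _ _; omega
  | succ i ih =>
    intro a h1 h2 hq hrest
    unfold pvScanDown
    by_cases ha : a = i + 1
    · subst ha; rw [if_pos hq]
    · rw [if_neg ?_]
      · exact ih a h1 (by omega) hq (fun j hj1 hj2 => hrest j hj1 (by omega))
      · rw [hrest (i+1) (by omega) (by omega)]; simp


lemma scanDown_splice (res : List String) (a : Nat) (b : List String)
    (hscan : pvScanDown res (res.length - 1) = some a)
    (hb : ∀ s ∈ b, pvQual s = false) :
    pvScanDown (res.take (a + 1) ++ b ++ res.drop (a + 1))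
      ((res.take (a + 1) ++ b ++ res.drop (a + 1)).length - 1) = some a := by
  obtain ⟨h1, h2, h3, h4⟩ := scanDown_some res (res.length - 1) a hscan
  have hlen : a + 1 ≤ res.length := by omega
  have hT : (res.take (a+1)).length = a + 1 := by simp; omega
  have hlen' : (res.take (a + 1) ++ b ++ res.drop (a + 1)).length = res.length + b.length := by
    simp; omega
  rw [hlen']
  apply scanDown_eq_some _ _ _ h1 (by omega)
  · rw [List.append_assoc, List.getD_append _ _ _ _ (by omega)]
    rw [List.getD_eq_getElem?_getD, List.getElem?_take, if_pos (by omega),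
        ← List.getD_eq_getElem?_getD]
    exact h3
  · intro j hj1 hj2
    rw [List.append_assoc, List.getD_append_right _ _ _ _ (by omega), hT]
    by_cases hm : j - (a+1) < b.length
    · rw [List.getD_append _ _ _ _ hm, List.getD_eq_getElem _ _ hm]
      exact hb _ (List.getElem_mem hm)
    · rw [List.getD_append_right _ _ _ _ (by omega)]
      rw [List.getD_eq_getElem?_getD, List.getElem?_drop, ← List.getD_eq_getElem?_getD]
      have := h4 (a + 1 + (j - (a+1) - b.length)) (by omega) (by omega)
      convert this using 3


lemma insert3_eq_splice (res : List String) (a : Nat) (f : String) (h : a + 1 ≤ res.length) :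
    PySem.List.insert
      (PySem.List.insert
        (PySem.List.insert res ((a + 1 : Nat) : Int) "")
        ((a + 2 : Nat) : Int) f)
      ((a + 3 : Nat) : Int) "" =
    res.take (a + 1) ++ ["", f, ""] ++ res.drop (a + 1) := by
  rw [PySem.List.insert_natCast res (a+1) "" h]
  set T := res.take (a+1) with hTdef
  set D := res.drop (a+1) with hDdef
  have hT : T.length = a + 1 := by rw [hTdef]; simp; omega
  have e1 : (T ++ "" :: D).take (a+2) = T ++ [""] := by
    rw [List.take_append, List.take_of_length_le (by omega), hT]
    simp
  have e2 : (T ++ "" :: D).drop (a+2) = D := by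
    rw [List.drop_append, List.drop_of_length_le (by omega), hT]
    simp
  rw [PySem.List.insert_natCast _ (a+2) f (by simp [hT]; omega)]
  rw [e1, e2]
  have hT2 : (T ++ [""]).length = a + 2 := by simp [hT]
  have e3 : ((T ++ [""]) ++ f :: D).take (a+3) = (T ++ [""]) ++ [f] := by
    rw [List.take_append, List.take_of_length_le (by omega), hT2]
    simp
  have e4 : ((T ++ [""]) ++ f :: D).drop (a+3) = D := by
    rw [List.drop_append, List.drop_of_length_le (by omega), hT2]
    simp
  rw [PySem.List.insert_natCast _ (a+3) "" (by simp [hT]; omega)]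
  rw [e3, e4]
  simp


lemma pvQual_fmt (img : List (String × String)) : pvQual (pvFmt img) = false := by
  have hsw : PySem.Chars.startswith (pvFmt img).toList ['!', '['] = true := by
    simp [pvFmt, PySem.Chars.startswith_iff]
  simp [pvQual, hsw]

lemma pvQual_block (img : List (String × String)) :
    ∀ s ∈ pvBlock img, pvQual s = false := by
  intro s hs
  simp [pvBlock] at hs
  rcases hs with h | h | h <;> subst h
  · decide
  · exact pvQual_fmt img
  · decide

lemma loopA_eq_splice :
    ∀ (leftover : List (List (String × String))) (res : List String) (a : Nat),
      pvScanDown res (res.length - 1) = some a →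
      pvLoopA res leftover =
        res.take (a + 1) ++ leftover.reverse.flatMap pvBlock ++ res.drop (a + 1) := by
  intro leftover
  induction leftover with
  | nil => intro res a _; simp [pvLoopA]
  | cons img rest ih =>
    intro res a hscan
    obtain ⟨h1, h2, _, _⟩ := scanDown_some res (res.length - 1) a hscan
    have hlen : a + 1 ≤ res.length := by omega
    have hT : (res.take (a+1)).length = a + 1 := by simp; omega
    have hstep : pvLoopA res (img :: rest)
        = pvLoopA (PySem.List.insert
            (PySem.List.insert
              (PySem.List.insert res ((a + 1 : Nat) : Int) "")
              ((a + 2 : Nat) : Int) (pvFmt img))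
            ((a + 3 : Nat) : Int) "") rest := by
      conv_lhs => rw [pvLoopA]
      rw [hscan]
    rw [hstep]
    rw [insert3_eq_splice res a (pvFmt img) hlen]
    have hblk : res.take (a + 1) ++ ["", pvFmt img, ""] ++ res.drop (a + 1)
        = res.take (a + 1) ++ pvBlock img ++ res.drop (a + 1) := rfl
    rw [hblk]
    rw [ih _ a (scanDown_splice res a (pvBlock img) hscan (pvQual_block img))]
    have eT : (res.take (a + 1) ++ pvBlock img ++ res.drop (a + 1)).take (a + 1)
        = res.take (a + 1) := by
      rw [List.append_assoc, List.take_append, List.take_of_length_le (by omega), hT]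
      simp
    have eD : (res.take (a + 1) ++ pvBlock img ++ res.drop (a + 1)).drop (a + 1)
        = pvBlock img ++ res.drop (a + 1) := by
      rw [List.append_assoc, List.drop_append, List.drop_of_length_le (by omega), hT]
      simp
    rw [eT, eD]
    simp [List.flatMap_append, pvBlock]








-- ===== VERDICT (by name: the statement is the Claim_ definition above) =====
theorem insert_images_after_headings_py_spec : Claim_equal_insert_images_after_headings_py := by
  intro content images _hdom _hpre
  unfold Spec_insert_images_after_headings_py
  unfold insert_images_after_headings_py insert_images_after_headings_py_alt
  cases images with
  | nil => rfl
  | cons img0 imgs0 =>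
    simp only [List.isEmpty_cons, if_neg Bool.false_ne_true]
    obtain ⟨c, hleft, hfold⟩ :=
      pass1_foldA (img0 :: imgs0) (pvLines content) [] 0 (img0 :: imgs0) rfl
    rw [hfold]
    simp only [List.nil_append, Nat.zero_add]
    rw [← hleft]
    cases hrem : (pvPass1 (pvLines content) (img0 :: imgs0)).2 with
    | nil => simp [pvLoopA]
    | cons l ls =>
      simp only [List.isEmpty_cons, if_neg Bool.false_ne_true]
      cases hscan : pvScanDown (pvPass1 (pvLines content) (img0 :: imgs0)).1
          ((pvPass1 (pvLines content) (img0 :: imgs0)).1.length - 1) with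
      | none => simp [pvLoopA, hscan]
      | some a => rw [loopA_eq_splice (l :: ls) _ a hscan]
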